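-- pv_equiv track=rewrite | github.com/rakytap/sequential-quantum-gate-decomposer | squander/decomposition/qgd_Wide_Circuit_Optimization.py | canonical_prefix_ok
-- ===== SOURCE A (Python) =====
-- def canonical_prefix_ok(seq):
--     """Check whether a sequence of unordered pair steps has a canonical topological order.
--
--     Returns:
--         ``-1`` if the prefix is OK; otherwise the first index where canonical order fails.
--     """
--     m = len(seq)
--     if m <= 1:
--         return -1
--     succ = {}
--     indeg = {}
--     last_on = {}
--     for k in range(m):
--         for q in seq[k]:
--             if q in last_on:
--                 p = last_on[q]
--                 succ.setdefault(p, []).append(k)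
--                 indeg[k] = indeg.get(k, 0) + 1
--             last_on[q] = k
--     import heapq
--
--     pq = [(seq[x], x) for x in range(m) if indeg.get(x, 0) == 0]
--     heapq.heapify(pq)
--     for pos in range(m):
--         # Kahn's algorithm
--         if len(pq) == 0:
--             return pos  # malformed (shouldn't happen)
--         u = heapq.heappop(pq)
--         if u[1] != pos:
--             return pos  # deviation: not canonical
--         for v in succ.get(u[1], ()):
--             indeg[v] -= 1
--             if indeg[v] == 0:
--                 heapq.heappush(pq, (seq[v], v))
--     return -1
-- ===== SOURCE B (Python) =====
-- def canonical_prefix_ok(seq):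
--     """Check whether a sequence of unordered pair steps has a canonical topological order.
--
--     Returns:
--         ``-1`` if the prefix is OK; otherwise the first index where canonical order fails.
--     """
--     m = len(seq)
--     if m <= 1:
--         return -1
--     # maxpred[k] = index of the latest earlier step sharing a qubit with step k
--     # (k itself when the pair repeats a qubit), or -1 when step k depends on nothing.
--     last = {}
--     maxpred = []
--     for k, pair in enumerate(seq):
--         mp = -1
--         for q in pair:
--             if q in last and last[q] > mp:
--                 mp = last[q]
--             last[q] = k
--         maxpred.append(mp)
--     # Step pos is the canonical next step iff it is ready (maxpred[pos] < pos) and no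
--     # later ready step x beats it in the (seq[x], x) ordering, i.e. has seq[x] < seq[pos].
--     for pos in range(m):
--         if maxpred[pos] >= pos:
--             return pos
--         for x in range(pos + 1, m):
--             if maxpred[x] < pos and seq[x] < seq[pos]:
--                 return pos
--     return -1
-- ===== Notes on version B (the rewrite author's own statement) =====
-- stated objective: alternative
-- what changed: A's Kahn peeling with a binary heap (build succ/indeg dicts, repeatedly pop the least (seq[x], x) entry and decrement successors) is replaced by a closed characterization: one pass computes maxpred[k], the latest earlier step sharing a qubit (k itself on a degenerate pair), and pos is the first failure iff maxpred[pos] >= pos or some later step x with maxpred[x] < pos has seq[x] < seq[pos]; no queue, successor lists or indegree bookkeeping remain.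
import Mathlib
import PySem

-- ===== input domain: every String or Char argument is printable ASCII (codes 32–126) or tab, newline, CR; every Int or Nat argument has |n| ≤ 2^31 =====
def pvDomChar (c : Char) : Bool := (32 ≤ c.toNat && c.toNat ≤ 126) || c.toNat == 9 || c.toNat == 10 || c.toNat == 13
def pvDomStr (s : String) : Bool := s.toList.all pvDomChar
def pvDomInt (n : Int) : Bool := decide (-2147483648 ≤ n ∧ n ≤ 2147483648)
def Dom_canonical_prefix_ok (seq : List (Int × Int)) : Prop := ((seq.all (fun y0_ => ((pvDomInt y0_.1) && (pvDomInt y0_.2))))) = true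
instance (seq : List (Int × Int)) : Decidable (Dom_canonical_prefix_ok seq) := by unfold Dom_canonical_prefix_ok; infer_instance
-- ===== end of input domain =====

-- B drops Kahn's queue-peeling entirely: one pass computes each step's latest predecessor
-- index, then a direct scan finds the first position beaten by a later ready step; no heap,
-- no successor lists, no indegree bookkeeping; no speed claim.

-- ===== PORT A =====
-- Python's heapq is used only through heapify / heappop / heappush on the tuples
-- ((seq[x][0], seq[x][1]), x), compared lexicographically.  The heap is modelled by the
-- sorted list of its items: heapify = sort, heappop = head, heappush = re-sort with the new
-- item.  This is exact for everything the function observes: heappop returns the least item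
-- of the heap (heapq's documented behaviour), which is the head of the sorted item list.

-- lexicographic order key of a heap entry ((a, b), x)  —  Python's tuple order on ((a,b),x)
def pvKey (u : (Int × Int) × Int) : Int ×ₗ Int ×ₗ Int := toLex (u.1.1, toLex (u.1.2, u.2))

-- the heap entry (seq[x], x); exact: only built for in-range x (a comprehension over range(m)
-- and successors v < m), where pyGetD equals seq[x]
def pvItem (seq : List (Int × Int)) (x : Int) : (Int × Int) × Int :=
  (PySem.List.pyGetD seq x (0, 0), x)

-- first loop 'for k in range(m): for q in seq[k]: …' building (succ, indeg, last_on)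
def pvBuild (seq : List (Int × Int)) :
    PySem.Dict Int (List Int) × PySem.Dict Int Int × PySem.Dict Int Int :=
  (PySem.List.pyRange 0 (PySem.List.len seq) 1).foldl (fun st k =>
    let pr := PySem.List.pyGetD seq k (0, 0)
    [pr.1, pr.2].foldl (fun st q =>
      match st.2.2.get? q with
      | some p => (st.1.modify p [] (· ++ [k]),          -- succ.setdefault(p, []).append(k)
                   st.2.1.insert k (st.2.1.getD k 0 + 1), -- indeg[k] = indeg.get(k, 0) + 1
                   st.2.2.insert q k)                     -- last_on[q] = k
      | none   => (st.1, st.2.1, st.2.2.insert q k)) st)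
    (PySem.Dict.empty, PySem.Dict.empty, PySem.Dict.empty)

-- heappush(pq, (seq[v], v)) under the sorted-list heap model
def pvPushA (seq : List (Int × Int)) (pq : List ((Int × Int) × Int)) (v : Int) :
    List ((Int × Int) × Int) :=
  PySem.List.sorted (pq ++ [pvItem seq v]) pvKey false

-- body of 'for v in succ.get(u[1], ())'
def pvStepA (seq : List (Int × Int)) (st : PySem.Dict Int Int × List ((Int × Int) × Int))
    (v : Int) : PySem.Dict Int Int × List ((Int × Int) × Int) :=
  -- indeg[v] -= 1 (v is always a key of indeg, so insert-of-decremented-getD is exact),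
  -- then 'if indeg[v] == 0: heappush(pq, (seq[v], v))'
  if (st.1.insert v (st.1.getD v 0 - 1)).getD v 0 = 0 then
    (st.1.insert v (st.1.getD v 0 - 1), pvPushA seq st.2 v)
  else (st.1.insert v (st.1.getD v 0 - 1), st.2)

-- 'for pos in range(m)' with its early returns
def pvLoopA (seq : List (Int × Int)) (succ : PySem.Dict Int (List Int)) :
    List Int → PySem.Dict Int Int → List ((Int × Int) × Int) → Int
  | [], _, _ => -1
  | pos :: rest, indeg, pq =>
    match pq with
    | [] => pos                                 -- len(pq) == 0
    | u :: pq' =>                               -- u = heappop(pq)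
      if u.2 ≠ pos then pos
      else
        let st := (succ.getD u.2 []).foldl (pvStepA seq) (indeg, pq')
        pvLoopA seq succ rest st.1 st.2

def canonical_prefix_ok (seq : List (Int × Int)) : Int :=
  let m : Int := PySem.List.len seq
  if m ≤ 1 then -1
  else
    let g := pvBuild seq
    -- pq = [(seq[x], x) for x in range(m) if indeg.get(x, 0) == 0]; heapify(pq)
    let pq := PySem.List.sorted
      (((PySem.List.pyRange 0 m 1).filter (fun x => g.2.1.getD x 0 == 0)).map (pvItem seq))
      pvKey false
    pvLoopA seq g.1 (PySem.List.pyRange 0 m 1) g.2.1 pq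

-- ===== PORT B =====
-- body of 'for q in pair: if q in last and last[q] > mp: mp = last[q]; last[q] = k'
def pvMPInner (k : Int) (st : PySem.Dict Int Int × Int) (q : Int) :
    PySem.Dict Int Int × Int :=
  let mp := match st.1.get? q with
    | some j => if j > st.2 then j else st.2
    | none => st.2
  (st.1.insert q k, mp)

-- 'for k, pair in enumerate(seq): …; maxpred.append(mp)'
def pvMaxpreds (seq : List (Int × Int)) : List Int :=
  ((PySem.List.enumerate seq 0).foldl (fun st kp =>
      let r := [kp.2.1, kp.2.2].foldl (pvMPInner kp.1) (st.1, -1)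
      (r.1, st.2 ++ [r.2]))
    (PySem.Dict.empty, [])).2

-- Python's tuple comparison seq[x] < seq[pos] on the two int pairs
def pvPairLt (a b : Int × Int) : Bool := a.1 < b.1 || (a.1 == b.1 && a.2 < b.2)

-- 'for pos in range(m)' with the inner 'for x in range(pos+1, m)' early return
def pvLoopC (seq : List (Int × Int)) (mp : List Int) (m : Int) : List Int → Int
  | [] => -1
  | pos :: rest =>
    if pos ≤ PySem.List.pyGetD mp pos 0 then pos        -- maxpred[pos] >= pos
    else if (PySem.List.pyRange (pos + 1) m 1).any (fun x =>
        decide (PySem.List.pyGetD mp x 0 < pos) &&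
        pvPairLt (PySem.List.pyGetD seq x (0, 0)) (PySem.List.pyGetD seq pos (0, 0))) then pos
    else pvLoopC seq mp m rest

def canonical_prefix_ok_alt (seq : List (Int × Int)) : Int :=
  let m : Int := PySem.List.len seq
  if m ≤ 1 then -1
  else pvLoopC seq (pvMaxpreds seq) m (PySem.List.pyRange 0 m 1)

-- ===== PRECONDITION & SPEC =====
def Spec_canonical_prefix_ok (seq : List (Int × Int)) (out : Int) : Prop := out = canonical_prefix_ok_alt seq
instance (seq : List (Int × Int)) (out : Int) : Decidable (Spec_canonical_prefix_ok seq out) := by unfold Spec_canonical_prefix_ok; infer_instance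

-- ===== CLAIM (what is proved, stated in full; the proofs are below) =====
def Claim_equal_canonical_prefix_ok : Prop := ∀ (seq : List (Int × Int)), Dom_canonical_prefix_ok seq → Spec_canonical_prefix_ok seq (canonical_prefix_ok seq)

-- ===== LEMMAS AND PROOFS =====

-- ---- ground-truth description of the dependency structure ----

-- seq[j] as a total function
def pairAt (seq : List (Int × Int)) (j : Nat) : Int × Int := seq.getD j (0, 0)

-- last index j < k whose pair touches qubit q
def lastI (seq : List (Int × Int)) : Nat → Int → Option Int
  | 0, _ => none
  | k + 1, q =>
    if (pairAt seq k).1 = q ∨ (pairAt seq k).2 = q then some (k : Int) else lastI seq k q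

-- the predecessor indices recorded for step k, in recording order (with multiplicity)
def preds (seq : List (Int × Int)) (k : Nat) : List Int :=
  (match lastI seq k (pairAt seq k).1 with | some p => [p] | none => []) ++
  (if (pairAt seq k).2 = (pairAt seq k).1 then [(k : Int)]
   else match lastI seq k (pairAt seq k).2 with | some p => [p] | none => [])

-- maxpred of step k
def mpS (seq : List (Int × Int)) (k : Nat) : Int := (preds seq k).foldl max (-1)

-- indegree after the whole build, seen through getD · 0
def degI (seq : List (Int × Int)) (k : Nat) (x : Int) : Int :=
  if 0 ≤ x ∧ x.toNat < k ∧ x < k then ((preds seq x.toNat).length : Int) else 0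

-- predecessors of x not yet popped when positions < pos are gone
def remI (seq : List (Int × Int)) (pos x : Int) : Int :=
  if 0 ≤ x ∧ x.toNat < seq.length then
    (((preds seq x.toNat).filter (fun p => pos ≤ p)).length : Int) else 0

-- succ[p] after the first k build steps
def succL (seq : List (Int × Int)) (k : Nat) (p : Int) : List Int :=
  (List.range k).flatMap (fun k' => List.replicate ((preds seq k').count p) (k' : Int))

-- the available (ready, unpopped) positions at step pos
def availL (seq : List (Int × Int)) (pos : Int) : List Int :=
  (PySem.List.pyRange pos (PySem.List.len seq) 1).filter
    (fun x => decide (mpS seq x.toNat < pos))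

-- the indices pushed by the successor fold, in push order (mirrors pvStepA's test)
def pushedF : List Int → (Int → Int) → List Int
  | [], _ => []
  | v :: vs, f =>
    if f v - 1 = 0 then v :: pushedF vs (fun x => if x = v then f x - 1 else f x)
    else pushedF vs (fun x => if x = v then f x - 1 else f x)

-- ---- small facts ----

lemma pvKey_inj {u w : (Int × Int) × Int} (h : pvKey u = pvKey w) : u = w := by
  simp only [pvKey, toLex_inj, Prod.mk.injEq] at h
  obtain ⟨h1, h2, h3⟩ := h
  exact Prod.ext (Prod.ext h1 h2) h3

lemma pvItem_inj (seq : List (Int × Int)) : Function.Injective (pvItem seq) := by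
  intro a b h
  simpa [pvItem] using congrArg Prod.snd h

lemma foldl_max_lt (l : List Int) (a c : Int) :
    l.foldl max a < c ↔ a < c ∧ ∀ x ∈ l, x < c := by
  induction l generalizing a with
  | nil => simp
  | cons y t ih => simp [ih]; tauto

lemma lastI_bounds (seq : List (Int × Int)) (k : Nat) (q : Int) (j : Int)
    (h : lastI seq k q = some j) : 0 ≤ j ∧ j < k := by
  induction k with
  | zero => simp [lastI] at h
  | succ n ih =>
    unfold lastI at h
    split at h
    · cases h; constructor <;> omega
    · have := ih h; omega

lemma preds_bounds (seq : List (Int × Int)) (k : Nat) (p : Int) (h : p ∈ preds seq k) :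
    0 ≤ p ∧ p ≤ k := by
  unfold preds at h
  rcases List.mem_append.mp h with h | h
  · rcases hl : lastI seq k (pairAt seq k).1 with _ | j <;> rw [hl] at h <;> simp at h
    subst h; have := lastI_bounds seq k _ _ hl; omega
  · split at h
    · simp at h; omega
    · rcases hl : lastI seq k (pairAt seq k).2 with _ | j <;> rw [hl] at h <;> simp at h
      subst h; have := lastI_bounds seq k _ _ hl; omega

-- mpS bounds the entries: all preds < c iff mpS < c (for c > -1 trivial side irrelevant)
lemma mpS_lt_iff (seq : List (Int × Int)) (k : Nat) (c : Int) (hc : -1 < c) :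
    mpS seq k < c ↔ ∀ p ∈ preds seq k, p < c := by
  unfold mpS
  rw [foldl_max_lt]
  constructor
  · exact fun h => h.2
  · exact fun h => ⟨hc, h⟩

-- counting: remaining at pos = remaining at pos+1 plus the multiplicity of pos
lemma filter_ge_split (l : List Int) (pos : Int) :
    ((l.filter (fun p => pos ≤ p)).length : Int)
      = ((l.filter (fun p => pos + 1 ≤ p)).length : Int) + l.count pos := by
  induction l with
  | nil => simp
  | cons y t ih =>
    by_cases h1 : pos = y
    · subst h1
      simp only [List.filter_cons, List.count_cons]
      rw [if_pos (by simp), if_neg (by simp)]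
      simp only [List.length_cons, beq_self_eq_true, if_pos]
      push_cast; omega
    · simp only [List.filter_cons, List.count_cons]
      have : (y == pos) = false := by simp [Ne.symm h1]
      rw [this]
      by_cases h2 : pos ≤ y
      · rw [if_pos (by simpa using h2), if_pos (by simp; omega)]
        simp only [List.length_cons]; push_cast; omega
      · rw [if_neg (by simpa using h2), if_neg (by simp; omega)]
        simpa using ih

lemma foldl_max_ge (l : List Int) (a x : Int) (h : x ∈ l) : x ≤ l.foldl max a := by
  induction l generalizing a with
  | nil => simp at h
  | cons y t ih =>
    rcases List.mem_cons.mp h with rfl | h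
    · calc x ≤ max a x := le_max_right _ _
        _ ≤ t.foldl max (max a x) := by
            by_contra hc
            push_neg at hc
            exact absurd ((foldl_max_lt t _ _).mp hc).1 (lt_irrefl _)
    · exact ih _ h

lemma count_succL (seq : List (Int × Int)) (m : Nat) (p x : Int) :
    (succL seq m p).count x
      = if 0 ≤ x ∧ x.toNat < m then (preds seq x.toNat).count p else 0 := by
  induction m with
  | zero => simp [succL]
  | succ n ih =>
    unfold succL
    rw [List.range_succ, List.flatMap_append]
    simp only [List.flatMap_cons, List.flatMap_nil, List.append_nil, List.count_append]
    rw [show ((List.range n).flatMap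
        (fun k' => List.replicate ((preds seq k').count p) (k' : Int))) = succL seq n p from rfl]
    rw [ih, List.count_replicate]
    simp only [beq_iff_eq]
    by_cases hx : x = (n : Int)
    · subst hx
      rw [if_neg (show ¬(0 ≤ (n : Int) ∧ ((n : Int)).toNat < n) by omega),
        if_pos rfl, if_pos (show 0 ≤ (n : Int) ∧ ((n : Int)).toNat < n + 1 by omega)]
      simp
    · rw [if_neg (show ¬((n : Int) = x) from fun hc => hx hc.symm)]
      by_cases h2 : 0 ≤ x ∧ x.toNat < n
      · rw [if_pos h2, if_pos (show 0 ≤ x ∧ x.toNat < n + 1 by omega)]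
        simp
      · rw [if_neg h2, if_neg (show ¬(0 ≤ x ∧ x.toNat < n + 1) by
          intro hc
          exact h2 ⟨hc.1, by omega⟩)]

lemma mem_succL (seq : List (Int × Int)) (m : Nat) (p x : Int) :
    x ∈ succL seq m p ↔ 0 ≤ x ∧ x.toNat < m ∧ p ∈ preds seq x.toNat := by
  rw [← List.count_pos_iff, count_succL]
  by_cases h : 0 ≤ x ∧ x.toNat < m
  · rw [if_pos h]
    rw [List.count_pos_iff]
    tauto
  · rw [if_neg h]
    simp only [lt_irrefl, false_iff]
    tauto

-- ---- characterizing the two builds ----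

-- the step of B's first loop, named for the induction
def mpStep (st : PySem.Dict Int Int × List Int) (kp : Int × (Int × Int)) :
    PySem.Dict Int Int × List Int :=
  let r := [kp.2.1, kp.2.2].foldl (pvMPInner kp.1) (st.1, -1)
  (r.1, st.2 ++ [r.2])

lemma pairAt_eq (seq : List (Int × Int)) (n : Nat) (hn : n < seq.length) :
    pairAt seq n = seq[n] := by
  rw [pairAt, List.getD_eq_getElem?_getD, List.getElem?_eq_getElem hn]; rfl

lemma mpStep_eval (st : PySem.Dict Int Int × List Int) (k a b : Int) :
    mpStep st (k, (a, b)) = ((st.1.insert a k).insert b k,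
      st.2 ++ [(pvMPInner k (pvMPInner k (st.1, -1) a) b).2]) := rfl

lemma mp_val (seq : List (Int × Int)) (n : Nat)
    (D : PySem.Dict Int Int) (hD : ∀ q, D.get? q = lastI seq n q) :
    (pvMPInner ↑n (pvMPInner ↑n (D, -1) (pairAt seq n).1) (pairAt seq n).2).2
      = mpS seq n := by
  have h1 : pvMPInner ↑n (D, -1) (pairAt seq n).1
      = (D.insert (pairAt seq n).1 ↑n,
         (match lastI seq n (pairAt seq n).1 with
          | some j => if j > -1 then j else -1
          | none => -1 : Int)) := by
    simp only [pvMPInner, hD]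
  rw [h1]
  have h2 : ∀ mp1 : Int, (pvMPInner ↑n (D.insert (pairAt seq n).1 ↑n, mp1) (pairAt seq n).2).2
      = (match (if (pairAt seq n).2 = (pairAt seq n).1 then some (n : Int)
               else lastI seq n (pairAt seq n).2) with
         | some j => if j > mp1 then j else mp1
         | none => mp1) := by
    intro mp1
    simp only [pvMPInner, PySem.Dict.get?_insert, hD]
  rw [h2]
  unfold mpS preds
  rcases hla : lastI seq n (pairAt seq n).1 with _ | p1
  · by_cases hba : (pairAt seq n).2 = (pairAt seq n).1
    · rw [if_pos hba, if_pos hba]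
      simp only [List.nil_append, List.foldl_cons, List.foldl_nil]
      simp only [max_def]
      split_ifs <;> omega
    · rw [if_neg hba, if_neg hba]
      rcases hlb : lastI seq n (pairAt seq n).2 with _ | p2
      · simp
      · have := lastI_bounds seq n _ _ hlb
        simp only [List.nil_append, List.foldl_cons, List.foldl_nil]
        simp only [max_def]
        split_ifs <;> omega
  · have hb1 := lastI_bounds seq n _ _ hla
    by_cases hba : (pairAt seq n).2 = (pairAt seq n).1
    · rw [if_pos hba, if_pos hba]
      simp only [List.cons_append, List.nil_append, List.foldl_cons, List.foldl_nil]
      simp only [max_def]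
      split_ifs <;> omega
    · rw [if_neg hba, if_neg hba]
      rcases hlb : lastI seq n (pairAt seq n).2 with _ | p2
      · simp only [List.append_nil, List.foldl_cons, List.foldl_nil]
        simp only [max_def]
        split_ifs <;> omega
      · have hb2 := lastI_bounds seq n _ _ hlb
        simp only [List.cons_append, List.nil_append, List.foldl_cons, List.foldl_nil]
        simp only [max_def]
        split_ifs <;> omega

lemma mpfold_inv (seq : List (Int × Int)) :
    ∀ (k : Nat), k ≤ seq.length →
      (∀ q, (((PySem.List.enumerate (seq.take k) 0).foldl mpStep
          (PySem.Dict.empty, ([] : List Int))).1.get? q) = lastI seq k q) ∧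
      ((PySem.List.enumerate (seq.take k) 0).foldl mpStep
          (PySem.Dict.empty, ([] : List Int))).2 = (List.range k).map (mpS seq) := by
  intro k
  induction k with
  | zero => exact fun _ => ⟨fun q => rfl, rfl⟩
  | succ n ih =>
    intro hk
    have hn : n < seq.length := by omega
    obtain ⟨ihd, ihl⟩ := ih (by omega)
    have htake : seq.take (n + 1) = seq.take n ++ [seq[n]] := by
      rw [List.take_add_one, List.getElem?_eq_getElem hn]; rfl
    have hlen : ((seq.take n).length : Int) = (n : Int) := by
      simp [List.length_take]; omega
    rw [htake, PySem.List.enumerate_append, List.foldl_append, hlen,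
      PySem.List.enumerate_cons, PySem.List.enumerate_nil]
    simp only [List.foldl_cons, List.foldl_nil, zero_add]
    rw [show ((n : Int), seq[n]) = ((n : Int), ((seq[n].1 : Int), (seq[n].2 : Int))) from rfl,
      mpStep_eval]
    constructor
    · intro q
      rw [PySem.Dict.get?_insert, PySem.Dict.get?_insert]
      simp only [lastI, pairAt_eq seq n hn]
      by_cases hqb : q = seq[n].2
      · rw [if_pos hqb, if_pos (by tauto)]
      · rw [if_neg hqb]
        by_cases hqa : q = seq[n].1
        · rw [if_pos hqa, if_pos (by tauto)]
        · rw [if_neg hqa, if_neg (by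
            rintro (h | h)
            · exact hqa h.symm
            · exact hqb h.symm)]
          exact ihd q
    · rw [ihl]
      have := mp_val seq n _ ihd
      rw [pairAt_eq seq n hn] at this
      rw [this, List.range_succ, List.map_append]
      rfl

lemma pvMaxpreds_spec (seq : List (Int × Int)) :
    pvMaxpreds seq = (List.range seq.length).map (fun k => mpS seq k) := by
  have h := (mpfold_inv seq seq.length le_rfl).2
  rw [List.take_length] at h
  exact h

-- the step of A's build loop, named for the induction
def bStep (st : PySem.Dict Int (List Int) × PySem.Dict Int Int × PySem.Dict Int Int)
    (kp : Int × (Int × Int)) :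
    PySem.Dict Int (List Int) × PySem.Dict Int Int × PySem.Dict Int Int :=
  [kp.2.1, kp.2.2].foldl (fun st q =>
    match st.2.2.get? q with
    | some p => (st.1.modify p [] (· ++ [kp.1]),
                 st.2.1.insert kp.1 (st.2.1.getD kp.1 0 + 1),
                 st.2.2.insert q kp.1)
    | none   => (st.1, st.2.1, st.2.2.insert q kp.1)) st

lemma pvBuild_eq_enum (seq : List (Int × Int)) :
    pvBuild seq = (PySem.List.enumerate seq 0).foldl bStep
      (PySem.Dict.empty, PySem.Dict.empty, PySem.Dict.empty) := by
  rw [PySem.List.enumerate_eq_map_pyRange (xs := seq) ((0 : Int), (0 : Int)), List.foldl_map]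
  rfl

lemma succL_succ (seq : List (Int × Int)) (n : Nat) (p : Int) :
    succL seq (n + 1) p = succL seq n p ++ List.replicate ((preds seq n).count p) (n : Int) := by
  unfold succL
  rw [List.range_succ, List.flatMap_append]
  simp

lemma degI_succ (seq : List (Int × Int)) (n : Nat) (x : Int) :
    degI seq (n + 1) x
      = if x = (n : Int) then ((preds seq n).length : Int) else degI seq n x := by
  unfold degI
  by_cases hx : x = (n : Int)
  · subst hx
    rw [if_pos (by omega), if_pos rfl]
    simp
  · rw [if_neg hx]
    by_cases h : 0 ≤ x ∧ x.toNat < n ∧ x < n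
    · rw [if_pos (by omega), if_pos h]
    · rw [if_neg (by
        intro hc
        have hxn : x ≠ (n : Int) := hx
        exact h ⟨hc.1, by omega, by omega⟩), if_neg h]

lemma degI_self (seq : List (Int × Int)) (n : Nat) : degI seq n (n : Int) = 0 := by
  unfold degI
  rw [if_neg (by omega)]

lemma getD_modify_app (S : PySem.Dict Int (List Int)) (c p k : Int) :
    (S.modify c [] (· ++ [k])).getD p [] = S.getD p [] ++ (if c = p then [k] else []) := by
  rw [PySem.Dict.getD_modify]
  by_cases h : p = c
  · subst h; simp
  · rw [if_neg h, if_neg (fun hh => h hh.symm)]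
    simp

lemma ite_single_replicate (c p k : Int) :
    (if c = p then [k] else []) = List.replicate (List.count p [c]) k := by
  by_cases h : c = p
  · subst h; simp
  · simp [h, Ne.symm h]

lemma ite_pair_replicate (c1 c2 p k : Int) :
    (if c1 = p then [k] else []) ++ (if c2 = p then [k] else [])
      = List.replicate (List.count p [c1, c2]) k := by
  by_cases h1 : c1 = p <;> by_cases h2 : c2 = p
  · simp [h1, h2, List.replicate_succ]
  · simp [h1, h2, Ne.symm h2, List.replicate_succ]
  · simp [h1, h2, Ne.symm h1, List.replicate_succ]
  · simp [h1, h2, Ne.symm h1, Ne.symm h2]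

lemma bfold_inv (seq : List (Int × Int)) :
    ∀ (k : Nat), k ≤ seq.length →
      (∀ q, (((PySem.List.enumerate (seq.take k) 0).foldl bStep
          (PySem.Dict.empty, PySem.Dict.empty, PySem.Dict.empty)).2.2.get? q)
          = lastI seq k q) ∧
      (∀ x, (((PySem.List.enumerate (seq.take k) 0).foldl bStep
          (PySem.Dict.empty, PySem.Dict.empty, PySem.Dict.empty)).2.1.getD x 0)
          = degI seq k x) ∧
      (∀ p, (((PySem.List.enumerate (seq.take k) 0).foldl bStep
          (PySem.Dict.empty, PySem.Dict.empty, PySem.Dict.empty)).1.getD p [])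
          = succL seq k p) := by
  intro k
  induction k with
  | zero =>
    intro _
    refine ⟨fun q => rfl, fun x => ?_, fun p => rfl⟩
    rw [show degI seq 0 x = 0 by unfold degI; rw [if_neg (by omega)]]
    rfl
  | succ n ih =>
    intro hk
    have hn : n < seq.length := by omega
    obtain ⟨ihd, ihi, ihs⟩ := ih (by omega)
    have htake : seq.take (n + 1) = seq.take n ++ [seq[n]] := by
      rw [List.take_add_one, List.getElem?_eq_getElem hn]; rfl
    have hlen : ((seq.take n).length : Int) = (n : Int) := by
      simp [List.length_take]; omega
    rw [htake, PySem.List.enumerate_append, List.foldl_append, hlen,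
      PySem.List.enumerate_cons, PySem.List.enumerate_nil]
    simp only [List.foldl_cons, List.foldl_nil, zero_add]
    have hpa := pairAt_eq seq n hn
    have hpreds : preds seq n =
        (match lastI seq n seq[n].1 with | some p => [p] | none => []) ++
        (if seq[n].2 = seq[n].1 then [(n : Int)]
         else match lastI seq n seq[n].2 with | some p => [p] | none => []) := by
      unfold preds
      rw [hpa]
    have hlast : ∀ q, lastI seq (n + 1) q
        = if seq[n].1 = q ∨ seq[n].2 = q then some (n : Int) else lastI seq n q := by
      intro q
      simp only [lastI, hpa]
    have hlastgoal : ∀ (D : PySem.Dict Int Int), (∀ q, D.get? q = lastI seq n q) →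
        ∀ q, ((D.insert seq[n].1 (n : Int)).insert seq[n].2 (n : Int)).get? q
          = lastI seq (n + 1) q := by
      intro D hD q
      rw [PySem.Dict.get?_insert, PySem.Dict.get?_insert, hlast q]
      by_cases hqb : q = seq[n].2
      · rw [if_pos hqb, if_pos (by tauto)]
      · rw [if_neg hqb]
        by_cases hqa : q = seq[n].1
        · rw [if_pos hqa, if_pos (by tauto)]
        · rw [if_neg hqa, if_neg (by
            rintro (h | h)
            · exact hqa h.symm
            · exact hqb h.symm)]
          exact hD q
    rw [show ((n : Int), seq[n]) = ((n : Int), ((seq[n].1 : Int), (seq[n].2 : Int))) from rfl]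
    simp only [bStep, List.foldl_cons, List.foldl_nil]
    rcases hla : lastI seq n seq[n].1 with _ | p1
    · simp only [ihd, hla]
      rcases hba : decide (seq[n].2 = seq[n].1) with _ | _
      · have hba' : ¬ seq[n].2 = seq[n].1 := of_decide_eq_false hba
        rw [PySem.Dict.get?_insert, if_neg hba']
        rcases hlb : lastI seq n seq[n].2 with _ | p2
        · have hpe : preds seq n = [] := by rw [hpreds, hla, if_neg hba', hlb]; rfl
          simp only [ihd, hlb]
          refine ⟨hlastgoal _ ihd, fun x => ?_, fun p => ?_⟩
          · rw [ihi x, degI_succ]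
            by_cases hx : x = (n : Int)
            · subst hx
              rw [if_pos rfl, degI_self, hpe]
              simp
            · rw [if_neg hx]
          · rw [ihs p, succL_succ, hpe]
            simp
        · have hpe : preds seq n = [p2] := by rw [hpreds, hla, if_neg hba', hlb]; rfl
          simp only [ihd, hlb]
          refine ⟨hlastgoal _ ihd, fun x => ?_, fun p => ?_⟩
          · rw [PySem.Dict.getD_insert, degI_succ]
            by_cases hx : x = (n : Int)
            · subst hx
              rw [if_pos rfl, if_pos rfl, ihi, degI_self, hpe]
              simp
            · rw [if_neg hx, if_neg hx, ihi x]
          · rw [getD_modify_app, ihs p, succL_succ, hpe, ite_single_replicate]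
      · have hba' : seq[n].2 = seq[n].1 := of_decide_eq_true hba
        rw [PySem.Dict.get?_insert, if_pos hba']
        have hpe : preds seq n = [(n : Int)] := by rw [hpreds, hla, if_pos hba']; rfl
        refine ⟨hlastgoal _ ihd, fun x => ?_, fun p => ?_⟩
        · rw [PySem.Dict.getD_insert, degI_succ]
          by_cases hx : x = (n : Int)
          · subst hx
            rw [if_pos rfl, if_pos rfl, ihi, degI_self, hpe]
            simp
          · rw [if_neg hx, if_neg hx, ihi x]
        · rw [getD_modify_app, ihs p, succL_succ, hpe, ite_single_replicate]
    · have hb1 := lastI_bounds seq n _ _ hla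
      simp only [ihd, hla]
      rcases hba : decide (seq[n].2 = seq[n].1) with _ | _
      · have hba' : ¬ seq[n].2 = seq[n].1 := of_decide_eq_false hba
        rw [PySem.Dict.get?_insert, if_neg hba']
        rcases hlb : lastI seq n seq[n].2 with _ | p2
        · have hpe : preds seq n = [p1] := by rw [hpreds, hla, if_neg hba', hlb]; rfl
          simp only [ihd, hlb]
          refine ⟨hlastgoal _ ihd, fun x => ?_, fun p => ?_⟩
          · rw [PySem.Dict.getD_insert, degI_succ]
            by_cases hx : x = (n : Int)
            · subst hx
              rw [if_pos rfl, if_pos rfl, ihi, degI_self, hpe]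
              simp
            · rw [if_neg hx, if_neg hx, ihi x]
          · rw [getD_modify_app, ihs p, succL_succ, hpe, ite_single_replicate]
        · have hpe : preds seq n = [p1, p2] := by rw [hpreds, hla, if_neg hba', hlb]; rfl
          simp only [ihd, hlb]
          refine ⟨hlastgoal _ ihd, fun x => ?_, fun p => ?_⟩
          · rw [PySem.Dict.insert_insert_self, PySem.Dict.getD_insert_self,
              PySem.Dict.getD_insert, degI_succ]
            by_cases hx : x = (n : Int)
            · subst hx
              rw [if_pos rfl, if_pos rfl, ihi, degI_self, hpe]
              simp
            · rw [if_neg hx, if_neg hx, ihi x]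
          · rw [getD_modify_app, getD_modify_app, List.append_assoc, ihs p, succL_succ,
              hpe, ite_pair_replicate]
      · have hba' : seq[n].2 = seq[n].1 := of_decide_eq_true hba
        rw [PySem.Dict.get?_insert, if_pos hba']
        have hpe : preds seq n = [p1, (n : Int)] := by rw [hpreds, hla, if_pos hba']; rfl
        refine ⟨hlastgoal _ ihd, fun x => ?_, fun p => ?_⟩
        · rw [PySem.Dict.insert_insert_self, PySem.Dict.getD_insert_self,
            PySem.Dict.getD_insert, degI_succ]
          by_cases hx : x = (n : Int)
          · subst hx
            rw [if_pos rfl, if_pos rfl, ihi, degI_self, hpe]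
            simp
          · rw [if_neg hx, if_neg hx, ihi x]
        · rw [getD_modify_app, getD_modify_app, List.append_assoc, ihs p, succL_succ,
            hpe, ite_pair_replicate]

lemma pvBuild_spec (seq : List (Int × Int)) :
    (∀ p, (pvBuild seq).1.getD p [] = succL seq seq.length p) ∧
    (∀ x, (pvBuild seq).2.1.getD x 0 = degI seq seq.length x) := by
  obtain ⟨_, hi, hs⟩ := bfold_inv seq seq.length le_rfl
  rw [List.take_length] at hi hs
  rw [pvBuild_eq_enum]
  exact ⟨hs, hi⟩

-- ---- the successor fold ----

lemma foldA_run (seq : List (Int × Int)) (vs : List Int) :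
    ∀ (d : PySem.Dict Int Int) (pqL : List Int),
      (∀ x ∈ vs, (vs.count x : Int) ≤ d.getD x 0) →
      (∀ x, (vs.foldl (pvStepA seq) (d, PySem.List.sorted (pqL.map (pvItem seq)) pvKey false)).1.getD x 0
          = d.getD x 0 - vs.count x) ∧
      (vs.foldl (pvStepA seq) (d, PySem.List.sorted (pqL.map (pvItem seq)) pvKey false)).2
        = PySem.List.sorted ((pqL ++ pushedF vs (fun x => d.getD x 0)).map (pvItem seq)) pvKey false := by
  have hKinj : Function.Injective pvKey := fun _ _ h => pvKey_inj h
  induction vs with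
  | nil =>
    intro d pqL _
    constructor
    · intro x; simp
    · simp [pushedF]
  | cons v vs ih =>
    intro d pqL h
    simp only [List.foldl_cons]
    have hd1 : (d.insert v (d.getD v 0 - 1)).getD v 0 = d.getD v 0 - 1 :=
      PySem.Dict.getD_insert_self _ _ _ _
    have h' : ∀ x ∈ vs, (vs.count x : Int) ≤ (d.insert v (d.getD v 0 - 1)).getD x 0 := by
      intro x hx
      rw [PySem.Dict.getD_insert]
      by_cases hxv : x = v
      · subst hxv
        rw [if_pos rfl]
        have := h x (by simp)
        rw [List.count_cons_self] at this
        push_cast at this; omega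
      · rw [if_neg hxv]
        have := h x (by simp [hx])
        have hcc : (v :: vs).count x = vs.count x := by
          simp [List.count_cons, show ¬v = x from fun hh => hxv hh.symm]
        rw [hcc] at this
        exact this
    have hfun : (fun x => (d.insert v (d.getD v 0 - 1)).getD x 0)
        = (fun x => if x = v then (fun y => d.getD y 0) x - 1 else (fun y => d.getD y 0) x) := by
      funext x
      rw [PySem.Dict.getD_insert]
      by_cases hxv : x = v
      · subst hxv; simp
      · simp [hxv]
    have hcount : ∀ x, (d.getD x 0 - (v :: vs).count x : Int)
        = (d.insert v (d.getD v 0 - 1)).getD x 0 - vs.count x := by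
      intro x
      rw [PySem.Dict.getD_insert]
      by_cases hxv : x = v
      · subst hxv
        rw [if_pos rfl, List.count_cons_self]
        push_cast; ring
      · rw [if_neg hxv]
        have hcc : (v :: vs).count x = vs.count x := by
          simp [List.count_cons, show ¬v = x from fun hh => hxv hh.symm]
        rw [hcc]
    by_cases hp : d.getD v 0 - 1 = 0
    · have hstep : pvStepA seq (d, PySem.List.sorted (pqL.map (pvItem seq)) pvKey false) v
          = (d.insert v (d.getD v 0 - 1),
             PySem.List.sorted (((pqL ++ [v]).map (pvItem seq))) pvKey false) := by
        unfold pvStepA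
        rw [if_pos (by rw [hd1]; exact hp)]
        unfold pvPushA
        congr 1
        apply PySem.List.sorted_eq_sorted_of_perm _ _ _ hKinj
        rw [List.map_append]
        exact (PySem.List.sorted_perm _ _ _).append_right _
      rw [hstep]
      obtain ⟨ih1, ih2⟩ := ih (d.insert v (d.getD v 0 - 1)) (pqL ++ [v]) h'
      constructor
      · intro x
        rw [ih1 x, hcount x]
      · rw [ih2]
        have hPF : pushedF (v :: vs) (fun x => d.getD x 0)
            = v :: pushedF vs (fun x => (d.insert v (d.getD v 0 - 1)).getD x 0) := by
          simp only [pushedF]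
          rw [if_pos hp, hfun]
        rw [hPF]
        congr 1
        simp
    · have hstep : pvStepA seq (d, PySem.List.sorted (pqL.map (pvItem seq)) pvKey false) v
          = (d.insert v (d.getD v 0 - 1),
             PySem.List.sorted (pqL.map (pvItem seq)) pvKey false) := by
        unfold pvStepA
        rw [if_neg (by rw [hd1]; exact hp)]
      rw [hstep]
      obtain ⟨ih1, ih2⟩ := ih (d.insert v (d.getD v 0 - 1)) pqL h'
      constructor
      · intro x
        rw [ih1 x, hcount x]
      · rw [ih2]
        have hPF : pushedF (v :: vs) (fun x => d.getD x 0)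
            = pushedF vs (fun x => (d.insert v (d.getD v 0 - 1)).getD x 0) := by
          simp only [pushedF]
          rw [if_neg hp, hfun]
        rw [hPF]

lemma pushedF_hyp_step (vs : List Int) (v : Int) (f : Int → Int)
    (h : ∀ x ∈ (v :: vs), ((v :: vs).count x : Int) ≤ f x) :
    ∀ x ∈ vs, (vs.count x : Int) ≤ (fun x => if x = v then f x - 1 else f x) x := by
  intro x hx
  by_cases hxv : x = v
  · subst hxv
    have := h x (by simp)
    simp only [List.count_cons_self] at this
    simp only [if_pos rfl]
    push_cast at this ⊢
    omega
  · have := h x (by simp [hx])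
    simp [List.count_cons, show ¬v = x from fun hh => hxv hh.symm] at this
    simpa [hxv] using this

lemma pushedF_mem (vs : List Int) (f : Int → Int)
    (h : ∀ x ∈ vs, (vs.count x : Int) ≤ f x) (x : Int) :
    x ∈ pushedF vs f ↔ x ∈ vs ∧ f x = vs.count x := by
  induction vs generalizing f with
  | nil => simp [pushedF]
  | cons v vs ih =>
    have h' := pushedF_hyp_step vs v f h
    unfold pushedF
    by_cases hxv : x = v
    · subst hxv
      have hcv : ((vs.count x : Int)) + 1 ≤ f x := by
        have := h x (by simp)
        simp only [List.count_cons_self] at this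
        push_cast at this; omega
      split_ifs with hp
      · simp only [List.mem_cons, true_or, true_and, List.count_cons_self]
        have hc0 : vs.count x = 0 := by omega
        simp only [List.mem_cons, true_or, true_and] at *
        constructor
        · intro _; push_cast; omega
        · intro _; simp
      · rw [ih _ h']
        simp only [if_pos rfl, List.mem_cons, true_or, true_and, List.count_cons_self]
        constructor
        · intro ⟨hm, he⟩; push_cast at he ⊢; omega
        · intro he
          push_cast at he
          have hm : x ∈ vs := by
            rw [← List.count_pos_iff]; omega
          exact ⟨hm, by push_cast; omega⟩
    · have hcc : (v :: vs).count x = vs.count x := by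
        simp [List.count_cons, show ¬v = x from fun hh => hxv hh.symm]
      have hiff := ih _ h'
      split_ifs with hp
      · rw [List.mem_cons, List.mem_cons, hcc]
        constructor
        · rintro (rfl | hm)
          · exact absurd rfl hxv
          · rcases hiff.mp hm with ⟨hm2, he⟩
            simp only [hxv, if_false] at he
            exact ⟨Or.inr hm2, he⟩
        · rintro ⟨rfl | hm, he⟩
          · exact absurd rfl hxv
          · exact Or.inr (hiff.mpr ⟨hm, by simp only [hxv, if_false]; exact he⟩)
      · rw [hiff, List.mem_cons, hcc]
        constructor
        · rintro ⟨hm, he⟩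
          simp only [hxv, if_false] at he
          exact ⟨Or.inr hm, he⟩
        · rintro ⟨rfl | hm, he⟩
          · exact absurd rfl hxv
          · exact ⟨hm, by simp only [hxv, if_false]; exact he⟩

lemma pushedF_nodup (vs : List Int) (f : Int → Int)
    (h : ∀ x ∈ vs, (vs.count x : Int) ≤ f x) : (pushedF vs f).Nodup := by
  induction vs generalizing f with
  | nil => simp [pushedF]
  | cons v vs ih =>
    have h' := pushedF_hyp_step vs v f h
    unfold pushedF
    split_ifs with hp
    · refine List.nodup_cons.mpr ⟨?_, ih _ h'⟩
      intro hm
      rcases (pushedF_mem vs _ h' v).mp hm with ⟨hmv, he⟩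
      have he' : f v - 1 = (vs.count v : Int) := by simpa using he
      have : 0 < vs.count v := List.count_pos_iff.mpr hmv
      omega
    · exact ih _ h'

-- ---- the main loop ----

lemma key_lt_iff (u w : (Int × Int) × Int) :
    pvKey u < pvKey w
      ↔ u.1.1 < w.1.1 ∨ (u.1.1 = w.1.1 ∧ (u.1.2 < w.1.2 ∨ (u.1.2 = w.1.2 ∧ u.2 < w.2))) := by
  simp [pvKey, Prod.Lex.toLex_lt_toLex]

lemma pairLt_iff (a b : Int × Int) :
    pvPairLt a b = true ↔ (a.1 < b.1 ∨ (a.1 = b.1 ∧ a.2 < b.2)) := by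
  simp [pvPairLt]

lemma mem_availL (seq : List (Int × Int)) (pos x : Int) :
    x ∈ availL seq pos
      ↔ pos ≤ x ∧ x < (seq.length : Int) ∧ mpS seq x.toNat < pos := by
  unfold availL
  rw [List.mem_filter, PySem.List.mem_pyRange_one]
  simp
  tauto

lemma nodup_availL (seq : List (Int × Int)) (pos : Int) : (availL seq pos).Nodup :=
  (PySem.List.nodup_pyRange_one _ _).filter _

lemma pyGetD_mp (seq : List (Int × Int)) (x : Int) (h0 : 0 ≤ x)
    (hx : x < (seq.length : Int)) :
    PySem.List.pyGetD (pvMaxpreds seq) x 0 = mpS seq x.toNat := by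
  rw [pvMaxpreds_spec]
  rw [PySem.List.pyGetD_eq_getElem _ 0 h0 (by simp; omega)]
  rw [List.getElem_map, List.getElem_range]

lemma pyGetD_pairAt (seq : List (Int × Int)) (x : Int) (h0 : 0 ≤ x)
    (hx : x < (seq.length : Int)) :
    PySem.List.pyGetD seq x (0, 0) = pairAt seq x.toNat := by
  rw [PySem.List.pyGetD_eq_getElem _ (0, 0) h0 (by omega), pairAt_eq seq x.toNat (by omega)]

lemma remI_eq_zero_iff (seq : List (Int × Int)) (pos x : Int) (hpos : 0 ≤ pos)
    (h0 : 0 ≤ x) (hx : x < (seq.length : Int)) :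
    remI seq pos x = 0 ↔ mpS seq x.toNat < pos := by
  unfold remI
  rw [if_pos ⟨h0, by omega⟩, mpS_lt_iff seq x.toNat pos (by omega)]
  constructor
  · intro h p hp
    by_contra hc
    have hmem : p ∈ (preds seq x.toNat).filter (fun p => pos ≤ p) :=
      List.mem_filter.mpr ⟨hp, by simp; omega⟩
    have hlen0 : ((preds seq x.toNat).filter (fun p => pos ≤ p)).length = 0 := by
      exact_mod_cast h
    rw [List.eq_nil_of_length_eq_zero hlen0] at hmem
    simp at hmem
  · intro h
    have : (preds seq x.toNat).filter (fun p => pos ≤ p) = [] := by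
      apply List.filter_eq_nil_iff.mpr
      intro p hp
      have := h p hp
      simp; omega
    rw [this]
    rfl

lemma count_le_rem (l : List Int) (pos : Int) :
    (l.count pos : Int) ≤ ((l.filter (fun p => pos ≤ p)).length : Int) := by
  have : l.count pos ≤ (l.filter (fun p => pos ≤ p)).length := by
    rw [List.count_eq_countP, ← List.countP_eq_length_filter]
    apply List.countP_mono_left
    intro a _ ha
    simp only [beq_iff_eq] at ha
    simp
    omega
  exact_mod_cast this

lemma rem_step (seq : List (Int × Int)) (pos x : Int) :
    remI seq pos x - ((succL seq seq.length pos).count x : Int) = remI seq (pos + 1) x := by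
  rw [count_succL]
  unfold remI
  by_cases h : 0 ≤ x ∧ x.toNat < seq.length
  · rw [if_pos h, if_pos h, if_pos h, filter_ge_split (preds seq x.toNat) pos]
    ring
  · rw [if_neg h, if_neg h, if_neg h]
    ring

lemma remI_nonneg (seq : List (Int × Int)) (pos x : Int) : 0 ≤ remI seq pos x := by
  unfold remI
  split_ifs
  · positivity
  · rfl

lemma deg_rem (seq : List (Int × Int)) (x : Int) :
    degI seq seq.length x = remI seq 0 x := by
  unfold degI remI
  by_cases h : 0 ≤ x ∧ x.toNat < seq.length
  · rw [if_pos ⟨h.1, h.2, by omega⟩, if_pos h]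
    congr 2
    symm
    rw [List.filter_eq_self]
    intro p hp
    have := preds_bounds seq x.toNat p hp
    simp
    omega
  · rw [if_neg (by intro hc; exact h ⟨hc.1, hc.2.1⟩), if_neg h]

lemma loop_eq (seq : List (Int × Int)) (succD : PySem.Dict Int (List Int))
    (hsucc : ∀ p, succD.getD p [] = succL seq seq.length p) (n : Nat) :
    ∀ (pos : Int) (indegD : PySem.Dict Int Int),
      0 ≤ pos → pos + n = (seq.length : Int) →
      (∀ x, indegD.getD x 0 = remI seq pos x) →
      pvLoopA seq succD (PySem.List.pyRange pos (seq.length : Int) 1) indegD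
          (PySem.List.sorted ((availL seq pos).map (pvItem seq)) pvKey false)
        = pvLoopC seq (pvMaxpreds seq) (seq.length : Int)
            (PySem.List.pyRange pos (seq.length : Int) 1) := by
  induction n with
  | zero =>
    intro pos indegD h0 hlen _
    rw [PySem.List.pyRange_one_eq_nil (by omega)]
    rfl
  | succ n IH =>
    intro pos indegD h0 hlen hindeg
    have hKinj : Function.Injective pvKey := fun _ _ h => pvKey_inj h
    have hpos_lt : pos < (seq.length : Int) := by omega
    rw [PySem.List.pyRange_one_cons hpos_lt]
    have hmp_pos := pyGetD_mp seq pos h0 hpos_lt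
    have hany : ((PySem.List.pyRange (pos + 1) (seq.length : Int) 1).any (fun x =>
          decide (PySem.List.pyGetD (pvMaxpreds seq) x 0 < pos) &&
          pvPairLt (PySem.List.pyGetD seq x (0, 0)) (PySem.List.pyGetD seq pos (0, 0))) = true)
        ↔ ∃ x : Int, pos + 1 ≤ x ∧ x < (seq.length : Int) ∧ mpS seq x.toNat < pos ∧
            pvPairLt (pairAt seq x.toNat) (pairAt seq pos.toNat) = true := by
      rw [List.any_eq_true]
      constructor
      · rintro ⟨x, hxm, hx⟩
        rw [PySem.List.mem_pyRange_one] at hxm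
        rw [Bool.and_eq_true, decide_eq_true_eq] at hx
        rw [pyGetD_mp seq x (by omega) (by omega), pyGetD_pairAt seq x (by omega) (by omega),
          pyGetD_pairAt seq pos h0 hpos_lt] at hx
        exact ⟨x, hxm.1, hxm.2, hx.1, hx.2⟩
      · rintro ⟨x, hx1, hx2, hx3, hx4⟩
        refine ⟨x, PySem.List.mem_pyRange_one.mpr ⟨hx1, hx2⟩, ?_⟩
        rw [Bool.and_eq_true, decide_eq_true_eq,
          pyGetD_mp seq x (by omega) (by omega), pyGetD_pairAt seq x (by omega) (by omega),
          pyGetD_pairAt seq pos h0 hpos_lt]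
        exact ⟨hx3, hx4⟩
    by_cases hself : pos ≤ mpS seq pos.toNat
    · -- pos itself is not ready : both sides report pos
      have hB : pvLoopC seq (pvMaxpreds seq) (seq.length : Int)
          (pos :: PySem.List.pyRange (pos + 1) (seq.length : Int) 1) = pos := by
        simp only [pvLoopC, hmp_pos]
        rw [if_pos hself]
      rw [hB]
      rcases hS : PySem.List.sorted ((availL seq pos).map (pvItem seq)) pvKey false
        with _ | ⟨u, t⟩
      · rfl
      · have humem : u ∈ (availL seq pos).map (pvItem seq) := by
          rw [← PySem.List.mem_sorted _ pvKey false, hS]; simp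
        obtain ⟨y, hy, hyu⟩ := List.mem_map.mp humem
        rw [mem_availL] at hy
        have hyne : y ≠ pos := by intro hc; rw [hc] at hy; omega
        have hu2 : u.2 = y := by rw [← hyu]; rfl
        simp only [pvLoopA]
        rw [if_pos (by rw [hu2]; exact hyne)]
    · -- pos is ready, hence in the queue
      have hposav : pos ∈ availL seq pos := by rw [mem_availL]; omega
      have hSne : PySem.List.sorted ((availL seq pos).map (pvItem seq)) pvKey false ≠ [] := by
        rw [Ne, PySem.List.sorted_eq_nil_iff, List.map_eq_nil_iff]
        intro hc; rw [hc] at hposav; simp at hposav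
      rcases hS : PySem.List.sorted ((availL seq pos).map (pvItem seq)) pvKey false
        with _ | ⟨u, t⟩
      · exact absurd hS hSne
      have hmin := PySem.List.key_head_sorted_le _ pvKey hS
      have humem : u ∈ (availL seq pos).map (pvItem seq) := by
        rw [← PySem.List.mem_sorted _ pvKey false, hS]; simp
      obtain ⟨y0, hy0, hy0u⟩ := List.mem_map.mp humem
      have hitem : ∀ z : Int, 0 ≤ z → z < (seq.length : Int) →
          pvItem seq z = (pairAt seq z.toNat, z) := by
        intro z hz1 hz2
        unfold pvItem
        rw [pyGetD_pairAt seq z hz1 hz2]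
      by_cases hEx : ∃ x : Int, pos + 1 ≤ x ∧ x < (seq.length : Int) ∧
          mpS seq x.toNat < pos ∧ pvPairLt (pairAt seq x.toNat) (pairAt seq pos.toNat) = true
      · -- a later ready step beats pos : both report pos
        obtain ⟨x, hx1, hx2, hx3, hx4⟩ := hEx
        have hxav : x ∈ availL seq pos := by rw [mem_availL]; omega
        have hkxp : pvKey (pvItem seq x) < pvKey (pvItem seq pos) := by
          rw [hitem x (by omega) hx2, hitem pos h0 hpos_lt, key_lt_iff]
          rcases (pairLt_iff _ _).mp hx4 with h | ⟨h1, h2⟩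
          · exact Or.inl h
          · exact Or.inr ⟨h1, Or.inl h2⟩
        have hune : u.2 ≠ pos := by
          intro hc
          have hy0p : y0 = pos := by rw [← hy0u] at hc; exact hc
          rw [hy0p] at hy0u
          have hle := hmin (pvItem seq x) (List.mem_map_of_mem hxav)
          rw [← hy0u] at hle
          exact absurd (lt_of_le_of_lt hle hkxp) (lt_irrefl _)
        simp only [pvLoopA, pvLoopC, hmp_pos]
        rw [if_pos hune, if_neg hself, if_pos (hany.mpr ⟨x, hx1, hx2, hx3, hx4⟩)]
      · -- pos is the canonical head : both sides continue
        have hposmin : ∀ z ∈ availL seq pos,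
            pvKey (pvItem seq pos) ≤ pvKey (pvItem seq z) := by
          intro z hz
          rw [mem_availL] at hz
          rcases eq_or_lt_of_le hz.1 with hzp | hzp
          · rw [← hzp]
          · have hnp : ¬ pvPairLt (pairAt seq z.toNat) (pairAt seq pos.toNat) = true := by
              intro hc
              exact hEx ⟨z, by omega, hz.2.1, hz.2.2, hc⟩
            rw [pairLt_iff] at hnp
            push_neg at hnp
            apply le_of_lt
            rw [hitem z (by omega) hz.2.1, hitem pos h0 hpos_lt, key_lt_iff]
            rcases lt_or_eq_of_le hnp.1 with h | h
            · exact Or.inl h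
            · refine Or.inr ⟨h, ?_⟩
              rcases lt_or_eq_of_le (hnp.2 h.symm) with h2 | h2
              · exact Or.inl h2
              · exact Or.inr ⟨h2, hzp⟩
        have hu : u = pvItem seq pos := by
          have h1 : pvKey u ≤ pvKey (pvItem seq pos) :=
            hmin _ (List.mem_map_of_mem hposav)
          have h2 : pvKey (pvItem seq pos) ≤ pvKey u := by
            rw [← hy0u]
            exact hposmin y0 hy0
          exact pvKey_inj (le_antisymm h1 h2)
        have hu2 : u.2 = pos := by rw [hu]; rfl
        simp only [pvLoopA, pvLoopC, hmp_pos]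
        rw [if_neg (by rw [hu2]; exact fun h => h rfl), if_neg hself,
          if_neg (fun h => hEx (hany.mp h)), hu2, hsucc pos]
        -- the tail of the queue is the sorted remaining availability
        have hMnodup : ((availL seq pos).map (pvItem seq)).Nodup :=
          (nodup_availL seq pos).map (pvItem_inj seq)
        have hSnd : (u :: t).Nodup := by
          rw [← hS]
          exact ((PySem.List.sorted_perm _ _ _).nodup_iff).mpr hMnodup
        have hSpair : (u :: t).Pairwise (fun a b => pvKey a ≤ pvKey b) := by
          rw [← hS]
          exact PySem.List.sorted_pairwise _ _
        have htpair : t.Pairwise (fun a b => pvKey a < pvKey b) := by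
          have h1 := (List.pairwise_cons.mp hSpair).2
          have h2 : t.Pairwise (· ≠ ·) := (List.nodup_cons.mp hSnd).2
          exact (h1.and h2).imp
            (fun hab => lt_of_le_of_ne hab.1 (fun hk => hab.2 (pvKey_inj hk)))
        have htperm : t.Perm (((availL seq pos).erase pos).map (pvItem seq)) := by
          have hp1 : (u :: t).Perm ((availL seq pos).map (pvItem seq)) := by
            rw [← hS]
            exact PySem.List.sorted_perm _ _ _
          have hp2 := List.perm_cons_erase humem
          have hp3 := (hp1.trans hp2).cons_inv
          rw [List.map_erase (pvItem_inj seq), ← hu]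
          exact hp3
        have ht : PySem.List.sorted ((((availL seq pos).erase pos).map (pvItem seq)))
            pvKey false = t :=
          PySem.List.sorted_eq_of_perm_of_pairwise_lt _ _ pvKey htperm htpair
        rw [← ht]
        -- run the successor fold
        have hcnt : ∀ x ∈ succL seq seq.length pos,
            ((succL seq seq.length pos).count x : Int) ≤ indegD.getD x 0 := by
          intro x hx
          rw [hindeg x]
          rw [mem_succL] at hx
          rw [count_succL, if_pos ⟨hx.1, hx.2.1⟩]
          unfold remI
          rw [if_pos ⟨hx.1, hx.2.1⟩]
          exact count_le_rem _ _
        obtain ⟨hr1, hr2⟩ := foldA_run seq (succL seq seq.length pos) indegD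
          ((availL seq pos).erase pos) hcnt
        have hrem : (fun x : Int => indegD.getD x 0) = (fun x => remI seq pos x) :=
          funext hindeg
        rw [hrem] at hr2
        have hcnt' : ∀ x ∈ succL seq seq.length pos,
            ((succL seq seq.length pos).count x : Int) ≤ remI seq pos x := by
          intro x hx
          rw [← hindeg x]
          exact hcnt x hx
        -- the new queue is the availability at pos + 1
        have hnewperm : (((availL seq pos).erase pos)
              ++ pushedF (succL seq seq.length pos) (fun x => remI seq pos x)).Perm
            (availL seq (pos + 1)) := by
          have hnd1 : ((availL seq pos).erase pos).Nodup := (nodup_availL seq pos).erase _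
          have hnd2 := pushedF_nodup _ _ hcnt'
          have hdisj : ((availL seq pos).erase pos).Disjoint
              (pushedF (succL seq seq.length pos) (fun x => remI seq pos x)) := by
            intro a ha1 ha2
            have ha1' := ((nodup_availL seq pos).mem_erase_iff).mp ha1
            rw [mem_availL] at ha1'
            have hz : remI seq pos a = 0 :=
              (remI_eq_zero_iff seq pos a h0 (by omega) ha1'.2.2.1).mpr ha1'.2.2.2
            obtain ⟨hm, he⟩ := (pushedF_mem _ _ hcnt' a).mp ha2
            have : 0 < (succL seq seq.length pos).count a := List.count_pos_iff.mpr hm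
            omega
          rw [List.perm_ext_iff_of_nodup (hnd1.append hnd2 hdisj) (nodup_availL seq (pos + 1))]
          intro a
          rw [List.mem_append, ((nodup_availL seq pos).mem_erase_iff),
            pushedF_mem _ _ hcnt' a, mem_availL, mem_availL]
          constructor
          · rintro (⟨hne, h1, h2, h3⟩ | ⟨hm, he⟩)
            · exact ⟨by omega, h2, by omega⟩
            · rw [mem_succL] at hm
              obtain ⟨ha0, halen, hap⟩ := hm
              have hcnteq : ((succL seq seq.length pos).count a : Int)
                  = ((preds seq a.toNat).count pos : Int) := by
                rw [count_succL, if_pos ⟨ha0, halen⟩]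
              have hstep := rem_step seq pos a
              have hz1 : remI seq (pos + 1) a = 0 := by omega
              have hmp1 : mpS seq a.toNat < pos + 1 :=
                (remI_eq_zero_iff seq (pos + 1) a (by omega) ha0 (by omega)).mp hz1
              have hge : pos ≤ a := by
                have := (preds_bounds seq a.toNat pos hap).2
                omega
              have hanep : a ≠ pos := by
                intro hc
                have : pos ≤ mpS seq a.toNat := foldl_max_ge _ _ _ hap
                rw [hc] at this
                exact hself this
              exact ⟨by omega, by omega, hmp1⟩
          · rintro ⟨h1, h2, h3⟩
            by_cases hz : remI seq pos a = 0
            · left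
              refine ⟨by omega, by omega, h2, ?_⟩
              exact (remI_eq_zero_iff seq pos a h0 (by omega) h2).mp hz
            · right
              have hz1 : remI seq (pos + 1) a = 0 :=
                (remI_eq_zero_iff seq (pos + 1) a (by omega) (by omega) h2).mpr h3
              have hstep := rem_step seq pos a
              have hcnteq : ((succL seq seq.length pos).count a : Int)
                  = ((preds seq a.toNat).count pos : Int) := by
                rw [count_succL, if_pos ⟨by omega, by omega⟩]
              have hcp : 0 < (preds seq a.toNat).count pos := by
                have := remI_nonneg seq pos a
                omega
              refine ⟨?_, ?_⟩
              · rw [mem_succL]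
                exact ⟨by omega, by omega, List.count_pos_iff.mp hcp⟩
              · omega
        have hq : PySem.List.sorted ((((availL seq pos).erase pos)
              ++ pushedF (succL seq seq.length pos) (fun x => remI seq pos x)).map
              (pvItem seq)) pvKey false
            = PySem.List.sorted ((availL seq (pos + 1)).map (pvItem seq)) pvKey false :=
          PySem.List.sorted_eq_sorted_of_perm _ _ pvKey hKinj (hnewperm.map _)
        rw [hr2, hq]
        have hnewindeg : ∀ x,
            ((succL seq seq.length pos).foldl (pvStepA seq)
              (indegD, PySem.List.sorted ((((availL seq pos).erase pos)).map (pvItem seq))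
                pvKey false)).1.getD x 0 = remI seq (pos + 1) x := by
          intro x
          rw [hr1 x, hindeg x]
          exact rem_step seq pos x
        exact IH (pos + 1) _ (by omega) (by omega) hnewindeg

-- ===== VERDICT (by name: the statement is the Claim_ definition above) =====
theorem canonical_prefix_ok_spec : Claim_equal_canonical_prefix_ok := by
  intro seq _
  unfold Spec_canonical_prefix_ok
  simp only [canonical_prefix_ok, canonical_prefix_ok_alt]
  split_ifs with hm
  · rfl
  · obtain ⟨hsucc, hindeg⟩ := pvBuild_spec seq
    have hlen : PySem.List.len seq = (seq.length : Int) := by simp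
    have hfilter : ((PySem.List.pyRange 0 (PySem.List.len seq) 1).filter
        (fun x => (pvBuild seq).2.1.getD x 0 == 0)) = availL seq 0 := by
      unfold availL
      rw [hlen]
      apply List.filter_congr
      intro x hx
      rw [PySem.List.mem_pyRange_one] at hx
      rw [hindeg x]
      have hx2 : x.toNat < seq.length := by omega
      unfold degI
      rw [if_pos ⟨hx.1, hx2, by omega⟩]
      have hiff : (preds seq x.toNat).length = 0 ↔ mpS seq x.toNat < 0 := by
        rw [mpS_lt_iff seq x.toNat 0 (by omega)]
        constructor
        · intro h p hp
          rw [List.eq_nil_of_length_eq_zero h] at hp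
          simp at hp
        · intro h
          rcases hnil : preds seq x.toNat with _ | ⟨p, l⟩
          · rfl
          · have h1 := h p (by rw [hnil]; simp)
            have h2 := preds_bounds seq x.toNat p (by rw [hnil]; simp)
            omega
      by_cases hz : (preds seq x.toNat).length = 0
      · simp [hz, hiff.mp hz]
      · have hnz : ¬ mpS seq x.toNat < 0 := fun hc => hz (hiff.mpr hc)
        simp [hz, hnz]
    rw [hfilter, hlen]
    exact loop_eq seq (pvBuild seq).1 hsucc seq.length 0 (pvBuild seq).2.1 le_rfl
      (by omega) (fun x => by rw [hindeg x, deg_rem])
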